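-- pv_equiv track=rewrite | github.com/unfashion8/makaren | numerology.py | _year_digit_sum_for_cycle
-- ===== SOURCE A (Python) =====
-- def _reduce_to_one_digit_for_cycle(n: int) -> int:
--     if n <= 0:
--         return 1
--     for _ in range(20):
--         if n <= 9:
--             return n
--         if n == 11:
--             return 2
--         if n == 22:
--             return 4
--         n = sum(int(d) for d in str(n))
--     return n if 1 <= n <= 9 else 1
--
-- def _year_digit_sum_for_cycle(year: int) -> int:
--     s = str(year)
--     parts: list[int] = []
--     i = 0
--     while i < len(s):
--         if i + 2 <= len(s):
--             two = s[i : i + 2]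
--             if two == "11" or two == "22":
--                 parts.append(int(two))
--                 i += 2
--                 continue
--         parts.append(int(s[i]))
--         i += 1
--     total = sum(parts)
--     return _reduce_to_one_digit_for_cycle(total)
-- ===== SOURCE B (Python) =====
-- def _year_digit_sum_for_cycle(year: int) -> int:
--     total = sum(int(d) for d in str(year))
--     return 1 if total <= 0 else 1 + (total - 1) % 9
-- ===== Notes on version B (the rewrite author's own statement) =====
-- stated objective: simpler
-- what changed: Replaces the greedy two-character master-number tokenizer plus the capped iterative digit-sum reduction with a single closed-form digital root of the plain digit sum (grouping and the master-number early returns are mod-9 no-ops, and the iteration cap is never reached).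
import Mathlib
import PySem

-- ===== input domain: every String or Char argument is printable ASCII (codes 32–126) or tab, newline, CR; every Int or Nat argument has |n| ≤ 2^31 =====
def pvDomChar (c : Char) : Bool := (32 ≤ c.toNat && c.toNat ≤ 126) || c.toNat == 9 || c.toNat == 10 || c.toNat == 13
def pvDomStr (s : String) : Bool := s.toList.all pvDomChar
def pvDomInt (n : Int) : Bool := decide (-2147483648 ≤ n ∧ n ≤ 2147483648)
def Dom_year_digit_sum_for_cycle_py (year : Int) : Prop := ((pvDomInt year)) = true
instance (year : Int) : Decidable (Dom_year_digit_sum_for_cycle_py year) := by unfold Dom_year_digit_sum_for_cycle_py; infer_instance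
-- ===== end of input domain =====

-- B replaces A's greedy master-number tokenizer and capped reduction loop by the
-- closed-form digital root of the plain digit sum (objective: simpler).

-- ===== PORT A =====
-- int(d) for a single character d, as A's code does (none = ValueError, excluded by Pre_)
def pvValA (c : Char) : Int := (PySem.Int.ofChars? [c]).getD 0

-- sum(int(d) for d in str(n)), as used inside _reduce_to_one_digit_for_cycle
def pvDigitSumA (n : Int) : Int := ((PySem.Int.toChars n).map pvValA).sum

-- the 'for _ in range(20)' loop of _reduce_to_one_digit_for_cycle, fuel = remaining iterations
def pvReduceLoopA : Nat → Int → Int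
  | 0, n => if 1 ≤ n ∧ n ≤ 9 then n else 1
  | f + 1, n =>
      if n ≤ 9 then n
      else if n = 11 then 2
      else if n = 22 then 4
      else pvReduceLoopA f (pvDigitSumA n)

-- _reduce_to_one_digit_for_cycle
def pvReduceA (n : Int) : Int := if n ≤ 0 then 1 else pvReduceLoopA 20 n

-- the while-loop of _year_digit_sum_for_cycle: greedy 11/22 grouping over the digit string
def pvTokenizeA : List Char → List Int
  | [] => []
  | [c] => [pvValA c]
  | c1 :: c2 :: rest =>
      if [c1, c2] = ['1', '1'] ∨ [c1, c2] = ['2', '2'] then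
        (PySem.Int.ofChars? [c1, c2]).getD 0 :: pvTokenizeA rest
      else
        pvValA c1 :: pvTokenizeA (c2 :: rest)

def year_digit_sum_for_cycle_py (year : Int) : Int :=
  pvReduceA (pvTokenizeA (PySem.Int.toChars year)).sum

-- ===== PORT B =====
def year_digit_sum_for_cycle_py_alt (year : Int) : Int :=
  let total := ((PySem.Int.toChars year).map (fun c => (PySem.Int.ofChars? [c]).getD 0)).sum
  if total ≤ 0 then 1 else 1 + PySem.Int.mod (total - 1) 9

-- ===== PRECONDITION & SPEC =====
-- Pre_ excludes negative years only: there str(year) starts with '-' and int('-') raises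
-- ValueError in A (and in B alike); A returns on every nonnegative input.
def Pre_year_digit_sum_for_cycle_py (year : Int) : Prop := 0 ≤ year
instance (year : Int) : Decidable (Pre_year_digit_sum_for_cycle_py year) := by
  unfold Pre_year_digit_sum_for_cycle_py; infer_instance

def pvWitness_year_digit_sum_for_cycle_py : Int := 1984

def Spec_year_digit_sum_for_cycle_py (year : Int) (out : Int) : Prop :=
  out = year_digit_sum_for_cycle_py_alt year
instance (year : Int) (out : Int) : Decidable (Spec_year_digit_sum_for_cycle_py year out) := by
  unfold Spec_year_digit_sum_for_cycle_py; infer_instance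

-- ===== CLAIM (what is proved, stated in full; the proofs are below) =====
def Claim_equal_year_digit_sum_for_cycle_py : Prop :=
  ∀ (year : Int), Dom_year_digit_sum_for_cycle_py year →
    Pre_year_digit_sum_for_cycle_py year →
    Spec_year_digit_sum_for_cycle_py year (year_digit_sum_for_cycle_py year)

-- ===== LEMMAS AND PROOFS =====

-- every character produced by Nat.toDigitsCore 10 (on a digit-char accumulator) is a digit char
lemma pvToDigitsCore_chars (f : Nat) : ∀ (n : Nat) (l : List Char),
    (∀ c ∈ l, ∃ d, d < 10 ∧ c = Nat.digitChar d) →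
    ∀ c ∈ Nat.toDigitsCore 10 f n l, ∃ d, d < 10 ∧ c = Nat.digitChar d := by
  induction f with
  | zero =>
    intro n l hl c hc
    simp only [Nat.toDigitsCore] at hc
    exact hl c hc
  | succ f ih =>
    intro n l hl c hc
    simp only [Nat.toDigitsCore] at hc
    have hacc : ∀ c ∈ Nat.digitChar (n % 10) :: l, ∃ d, d < 10 ∧ c = Nat.digitChar d := by
      intro c hc
      rcases List.mem_cons.mp hc with hc | hc
      · exact ⟨n % 10, Nat.mod_lt _ (by norm_num), hc⟩
      · exact hl c hc
    split at hc
    · exact hacc c hc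
    · exact ih (n / 10) _ hacc c hc

lemma pvVal_digit (c : Char) (h : ∃ d, d < 10 ∧ c = Nat.digitChar d) :
    0 ≤ pvValA c ∧ pvValA c ≤ 9 := by
  obtain ⟨d, hd, rfl⟩ := h
  revert hd
  revert d
  decide

lemma pvS_nonneg (cs : List Char) (h : ∀ c ∈ cs, ∃ d, d < 10 ∧ c = Nat.digitChar d) :
    0 ≤ (cs.map pvValA).sum := by
  induction cs with
  | nil => simp
  | cons c cs ih =>
    simp only [List.map_cons, List.sum_cons]
    have h1 := (pvVal_digit c (h c (by simp))).1
    have h2 := ih (fun x hx => h x (by simp [hx]))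
    omega

-- the tokenizer's sum: equal to the plain digit sum mod 9, bounded by 11·length,
-- and zero whenever the plain digit sum is zero
lemma pvTok_spec (cs : List Char) (h : ∀ c ∈ cs, ∃ d, d < 10 ∧ c = Nat.digitChar d) :
    ∃ k : Nat, (pvTokenizeA cs).sum = (cs.map pvValA).sum + 9 * k ∧
      (pvTokenizeA cs).sum ≤ 11 * cs.length ∧
      ((cs.map pvValA).sum = 0 → (pvTokenizeA cs).sum = 0) := by
  induction cs using pvTokenizeA.induct with
  | case1 => exact ⟨0, by simp [pvTokenizeA]⟩
  | case2 c =>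
    have := pvVal_digit c (h c (by simp))
    exact ⟨0, by simp [pvTokenizeA]; omega⟩
  | case3 c1 c2 rest hif ih =>
    obtain ⟨k, hk, hb, hz⟩ := ih (fun x hx => h x (by simp [hx]))
    have hrest : 0 ≤ (rest.map pvValA).sum :=
      pvS_nonneg rest (fun x hx => h x (by simp [hx]))
    rcases hif with h11 | h22
    · obtain ⟨rfl, rfl⟩ : c1 = '1' ∧ c2 = '1' := by simpa using h11
      have htok : pvTokenizeA ('1' :: '1' :: rest) = 11 :: pvTokenizeA rest := by
        rw [pvTokenizeA, if_pos (Or.inl rfl),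
          show (PySem.Int.ofChars? ['1', '1']).getD 0 = 11 from by decide]
      have hv1 : pvValA '1' = 1 := by decide
      refine ⟨k + 1, ?_, ?_, ?_⟩
      · simp only [htok, List.sum_cons, List.map_cons, hv1]; push_cast; omega
      · simp only [htok, List.sum_cons, List.length_cons]; push_cast; omega
      · intro hc
        simp only [List.map_cons, List.sum_cons, hv1] at hc
        omega
    · obtain ⟨rfl, rfl⟩ : c1 = '2' ∧ c2 = '2' := by simpa using h22
      have htok : pvTokenizeA ('2' :: '2' :: rest) = 22 :: pvTokenizeA rest := by
        rw [pvTokenizeA, if_pos (Or.inr rfl),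
          show (PySem.Int.ofChars? ['2', '2']).getD 0 = 22 from by decide]
      have hv2 : pvValA '2' = 2 := by decide
      refine ⟨k + 2, ?_, ?_, ?_⟩
      · simp only [htok, List.sum_cons, List.map_cons, hv2]; push_cast; omega
      · simp only [htok, List.sum_cons, List.length_cons]; push_cast; omega
      · intro hc
        simp only [List.map_cons, List.sum_cons, hv2] at hc
        omega
  | case4 c1 c2 rest hif ih =>
    obtain ⟨k, hk, hb, hz⟩ := ih (fun x hx => h x (by simp [hx]))
    have hv := pvVal_digit c1 (h c1 (by simp))
    have hrest : 0 ≤ ((c2 :: rest).map pvValA).sum :=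
      pvS_nonneg _ (fun x hx => h x (by simp at hx; rcases hx with hx | hx <;> simp [hx]))
    have htok : pvTokenizeA (c1 :: c2 :: rest) = pvValA c1 :: pvTokenizeA (c2 :: rest) := by
      rw [pvTokenizeA, if_neg hif]
    simp only [List.map_cons, List.sum_cons, List.length_cons] at hk hb hz hrest ⊢
    refine ⟨k, ?_, ?_, ?_⟩
    · rw [htok]; simp only [List.sum_cons]; omega
    · rw [htok]; simp only [List.sum_cons]; push_cast at hb ⊢; omega
    · intro hc
      have h1 : pvValA c1 = 0 := by omega
      have h2 : (pvTokenizeA (c2 :: rest)).sum = 0 := hz (by omega)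
      rw [htok]; simp only [List.sum_cons, h1, h2]; omega

-- A's reduction loop computes the digital root on the range that can arise (总 ≤ 110)
lemma pvReduceLoop_dr : ∀ m : Nat, m < 110 →
    pvReduceLoopA 20 (((m + 1 : Nat)) : Int) = 1 + ((m : Int)) % 9 := by decide

theorem year_digit_sum_for_cycle_py_spec : Claim_equal_year_digit_sum_for_cycle_py := by
  intro year hdom hpre
  unfold Spec_year_digit_sum_for_cycle_py
  unfold Dom_year_digit_sum_for_cycle_py pvDomInt at hdom
  unfold Pre_year_digit_sum_for_cycle_py at hpre
  rw [decide_eq_true_eq] at hdom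
  set cs := PySem.Int.toChars year with hcs
  have hcs' : cs = Nat.toDigits 10 year.toNat := by
    rw [hcs, PySem.Int.toChars, if_neg (by omega)]
  have hdig : ∀ c ∈ cs, ∃ d, d < 10 ∧ c = Nat.digitChar d := by
    rw [hcs', Nat.toDigits]
    exact pvToDigitsCore_chars _ _ [] (by simp)
  have hlen : cs.length ≤ 10 := by
    rw [hcs']
    exact Nat.toDigits_length 10 year.toNat 10 (by norm_num) (by omega)
  obtain ⟨k, hk, hb, hz⟩ := pvTok_spec cs hdig
  have hS : 0 ≤ (cs.map pvValA).sum := pvS_nonneg cs hdig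
  show pvReduceA (pvTokenizeA cs).sum = year_digit_sum_for_cycle_py_alt year
  unfold year_digit_sum_for_cycle_py_alt
  rw [← hcs]
  have hmap : ((PySem.Int.toChars year).map (fun c => (PySem.Int.ofChars? [c]).getD 0)).sum
      = (cs.map pvValA).sum := by rw [← hcs]; rfl
  rw [hmap]
  set S := (cs.map pvValA).sum with hSdef
  by_cases hS0 : S ≤ 0
  · -- digit sum zero: tokenizer sum is zero too, both sides return 1
    have : S = 0 := le_antisymm hS0 hS
    rw [hz this, if_pos hS0]
    simp [pvReduceA]
  · -- 1 ≤ S: both sides are the digital root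
    rw [if_neg hS0]
    have hS1 : 1 ≤ S := by omega
    have htok1 : 1 ≤ (pvTokenizeA cs).sum := by omega
    have htok110 : (pvTokenizeA cs).sum ≤ 110 := by omega
    unfold pvReduceA
    rw [if_neg (by omega)]
    set T := (pvTokenizeA cs).sum with hT
    have hm : ∃ m : Nat, m < 110 ∧ T = ((m + 1 : Nat) : Int) := by
      refine ⟨(T - 1).toNat, by omega, by omega⟩
    obtain ⟨m, hm110, hmeq⟩ := hm
    rw [hmeq, pvReduceLoop_dr m hm110]
    have hmod : PySem.Int.mod (S - 1) 9 = (S - 1) % 9 := by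
      apply PySem.Int.mod_eq_emod_of_pos
      norm_num
    rw [hmod]
    have : (m : Int) = (S - 1) + 9 * k := by omega
    rw [this, Int.add_mul_emod_self_left]
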